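-- pv_equiv track=rewrite | github.com/50657472-416C6578656576/auto_logist | auto_logist/utils/get_digits.py | get_all
-- ===== SOURCE A (Python) =====
-- def get_all(string: str) -> list:
--     answer = []
--     separators = (',', '.')
--     previous = ''
--     for el in string:
--         if el.isdigit():
--             if previous in separators:
--                 answer.append(previous)
--             answer.append(el)
--             previous = el
--         elif el in separators and previous.isdigit():
--             previous = el
--         else:
--             previous = ''
--     return answer
-- ===== SOURCE B (Python) =====
-- def get_all(string: str) -> list:
--     cs = list(string)
--     return [c for p, c, nx in zip([None] + cs, cs, cs[1:] + [None])
--             if c.isdigit()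
--             or (c in ',.'
--                 and p is not None and p.isdigit()
--                 and nx is not None and nx.isdigit())]
-- ===== Notes on version B (the rewrite author's own statement) =====
-- stated objective: simpler
-- what changed: Replaced A's mutable previous-character state machine with a stateless one-liner: zip each character with its two neighbours and keep digits plus any separator character whose immediate neighbours are both digits.
import Mathlib
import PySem

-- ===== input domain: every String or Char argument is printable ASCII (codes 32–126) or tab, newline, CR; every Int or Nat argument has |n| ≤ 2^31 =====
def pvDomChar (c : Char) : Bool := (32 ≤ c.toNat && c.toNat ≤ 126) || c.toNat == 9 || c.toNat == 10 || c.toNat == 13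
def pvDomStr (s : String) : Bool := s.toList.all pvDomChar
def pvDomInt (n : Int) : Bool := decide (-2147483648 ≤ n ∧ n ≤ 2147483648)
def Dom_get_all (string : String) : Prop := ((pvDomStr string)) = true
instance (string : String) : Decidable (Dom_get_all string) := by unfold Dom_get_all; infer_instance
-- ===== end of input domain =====

-- B replaces A's `previous`-state machine by a stateless local rule: zip each character with its
-- neighbours and keep digits, plus a separator whose both neighbours are digits (objective: simpler).


-- ===== PORT A =====
-- A's loop: foldl with state (answer, previous); previous is a Python string ('' or one char).
def get_all (string : String) : List String :=
  (string.toList.foldl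
    (fun (st : List String × String) (el : Char) =>
      if PySem.Chars.isdigit el then
        ((if [",", "."].contains st.2 then st.1 ++ [st.2] else st.1) ++ [String.ofList [el]],
         String.ofList [el])
      else if [',', '.'].contains el && PySem.Str.strIsdigit st.2 then
        (st.1, String.ofList [el])
      else (st.1, ""))
    ([], "")).1

-- ===== PORT B =====
-- Source B's keep-condition for one (prev?, char, next?) window.
def pvKeep (p : Option Char) (c : Char) (nx : Option Char) : Bool :=
  PySem.Chars.isdigit c ||
    ([',', '.'].contains c
      && (match p with | some pc => PySem.Chars.isdigit pc | none => false)
      && (match nx with | some nc => PySem.Chars.isdigit nc | none => false))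

-- zip([None]+cs, cs, cs[1:]+[None]) as nested zips, then the comprehension (filter + map).
def get_all_alt (string : String) : List String :=
  let cs := string.toList
  ((List.zip (none :: cs.map some) (List.zip cs (cs.tail.map some ++ [none]))).filter
      (fun t => pvKeep t.1 t.2.1 t.2.2)).map (fun t => String.ofList [t.2.1])

-- ===== PRECONDITION & SPEC =====
def Spec_get_all (string : String) (out : List String) : Prop := out = get_all_alt string
instance (string : String) (out : List String) : Decidable (Spec_get_all string out) := by unfold Spec_get_all; infer_instance

-- ===== CLAIM (what is proved, stated in full; the proofs are below) =====
def Claim_equal_get_all : Prop := ∀ (string : String), Dom_get_all string → Spec_get_all string (get_all string)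

-- ===== LEMMAS AND PROOFS =====

-- A's loop, written as the list of strings it appends from state `prev` on.
def aRun : List Char → String → List String
  | [], _ => []
  | c :: cs, prev =>
    if PySem.Chars.isdigit c then
      (if [",", "."].contains prev then [prev] else []) ++ [String.ofList [c]] ++ aRun cs (String.ofList [c])
    else if [',', '.'].contains c && PySem.Str.strIsdigit prev then
      aRun cs (String.ofList [c])
    else aRun cs ""

-- B's comprehension, as a recursion carrying the previous character.
def bRun : Option Char → List Char → List String
  | _, [] => []
  | p, c :: cs =>
    (if pvKeep p c cs.head? then [String.ofList [c]] else []) ++ bRun (some c) cs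

-- the separator B has already emitted (at its own step) that A emits only at the NEXT (digit) step
def pend (prev : String) (cs : List Char) : List String :=
  if [",", "."].contains prev && (match cs with | c :: _ => PySem.Chars.isdigit c | [] => false)
  then [prev] else []

-- relation between A's string state and the actual previous character
def pvRel (prev : String) (p : Option Char) : Prop :=
  (∃ d, p = some d ∧ PySem.Chars.isdigit d = true ∧ prev = String.ofList [d]) ∨
  (∃ s, p = some s ∧ (s = ',' ∨ s = '.') ∧ prev = String.ofList [s]) ∨
  (prev = "" ∧ (p = none ∨ ∃ c, p = some c ∧ PySem.Chars.isdigit c = false))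

theorem strIsdigit_single (c : Char) :
    PySem.Str.strIsdigit (String.ofList [c]) = PySem.Chars.isdigit c := by
  simp [PySem.Str.strIsdigit_eq, PySem.Chars.strIsdigit]

theorem contains_single_of_digit (c : Char) (h : PySem.Chars.isdigit c = true) :
    ([",", "."].contains (String.ofList [c])) = false := by
  simp only [List.contains_eq_mem, List.mem_cons, List.not_mem_nil, or_false, decide_eq_false_iff_not]
  rintro (hc | hc) <;>
    · have := congrArg String.toList hc
      simp at this
      subst this
      simp [PySem.Chars.isdigit] at h

theorem contains_single_of_sep (c : Char) (h : c = ',' ∨ c = '.') :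
    ([",", "."].contains (String.ofList [c])) = true := by
  rcases h with h | h <;> subst h <;> decide

theorem foldl_fst (cs : List Char) (st : List String × String) :
    (cs.foldl
      (fun (st : List String × String) (el : Char) =>
        if PySem.Chars.isdigit el then
          ((if [",", "."].contains st.2 then st.1 ++ [st.2] else st.1) ++ [String.ofList [el]],
           String.ofList [el])
        else if [',', '.'].contains el && PySem.Str.strIsdigit st.2 then
          (st.1, String.ofList [el])
        else (st.1, ""))
      st).1 = st.1 ++ aRun cs st.2 := by
  induction cs generalizing st with
  | nil => simp [aRun]
  | cons c cs ih =>
    rw [List.foldl_cons, ih]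
    simp only [aRun]
    split_ifs <;> simp [List.append_assoc]

theorem zip_filter_eq_bRun (cs : List Char) (p : Option Char) :
    ((List.zip (p :: cs.map some) (List.zip cs (cs.tail.map some ++ [none]))).filter
      (fun t => pvKeep t.1 t.2.1 t.2.2)).map (fun t => String.ofList [t.2.1]) = bRun p cs := by
  induction cs generalizing p with
  | nil => simp [bRun]
  | cons c cs ih =>
    cases cs with
    | nil =>
      simp only [List.map_nil, List.tail_cons, List.nil_append, List.zip_cons_cons,
        List.zip_nil_right, List.filter_cons]
      have hb : bRun p [c] = if pvKeep p c none then [String.ofList [c]] else [] := by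
        simp [bRun]
      rw [hb]
      split_ifs <;> rfl
    | cons d cs' =>
      have hih := ih (some c)
      simp only [List.map_cons, List.tail_cons] at hih ⊢
      have hb : bRun p (c :: d :: cs') =
          (if pvKeep p c (some d) then [String.ofList [c]] else []) ++ bRun (some c) (d :: cs') := rfl
      rw [hb, ← hih]
      simp only [List.cons_append, List.zip_cons_cons, List.filter_cons]
      split_ifs <;> simp

theorem aRun_eq (cs : List Char) (prev : String) (p : Option Char) (h : pvRel prev p) :
    aRun cs prev = pend prev cs ++ bRun p cs := by
  induction cs generalizing prev p with
  | nil => simp [aRun, bRun, pend]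
  | cons c cs ih =>
    by_cases h1 : PySem.Chars.isdigit c = true
    · -- digit step: both keep c; A flushes a pending separator that B emitted one step earlier
      have hrec := ih (String.ofList [c]) (some c) (Or.inl ⟨c, rfl, h1, rfl⟩)
      have e1 : aRun (c :: cs) prev =
          (if [",", "."].contains prev then [prev] else []) ++ [String.ofList [c]]
            ++ aRun cs (String.ofList [c]) := by
        simp only [aRun]; rw [if_pos h1]
      have e2 : pend (String.ofList [c]) cs = [] := by
        unfold pend; rw [contains_single_of_digit c h1]; simp
      have e3 : bRun p (c :: cs) =
          (if pvKeep p c cs.head? then [String.ofList [c]] else []) ++ bRun (some c) cs := rfl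
      have e4 : pvKeep p c cs.head? = true := by simp [pvKeep, h1]
      have e5 : pend prev (c :: cs) = (if [",", "."].contains prev then [prev] else []) := by
        unfold pend; simp [h1]
      rw [e1, hrec, e2, e3, e4, e5]
      simp
    · by_cases h2 : ([',', '.'].contains c && PySem.Str.strIsdigit prev) = true
      · -- separator after a digit: A remembers it; B emitted it iff the next char is a digit
        rw [Bool.and_eq_true] at h2
        obtain ⟨hsep, hdig⟩ := h2
        have hsep' : c = ',' ∨ c = '.' := by simpa using hsep
        have h1' : PySem.Chars.isdigit c = false := by simpa using h1
        have hco : ([",", "."].contains (String.ofList [c])) = true := contains_single_of_sep c hsep'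
        have hp : ∃ d, p = some d ∧ PySem.Chars.isdigit d = true := by
          rcases h with ⟨d, hpv, hd, hprev⟩ | ⟨s, hpv, hs, hprev⟩ | ⟨hprev, _⟩
          · exact ⟨d, hpv, hd⟩
          · rw [hprev, strIsdigit_single] at hdig
            rcases hs with hs | hs <;> subst hs <;> simp [PySem.Chars.isdigit] at hdig
          · rw [hprev] at hdig
            simp [PySem.Str.strIsdigit_eq, PySem.Chars.strIsdigit] at hdig
        obtain ⟨d, hpv, hd⟩ := hp
        subst hpv
        have hrec := ih (String.ofList [c]) (some c) (Or.inr (Or.inl ⟨c, rfl, hsep', rfl⟩))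
        have e1 : aRun (c :: cs) prev = aRun cs (String.ofList [c]) := by
          simp only [aRun]
          rw [if_neg h1, if_pos (by rw [hsep, hdig]; rfl)]
        have e3 : bRun (some d) (c :: cs) =
            (if pvKeep (some d) c cs.head? then [String.ofList [c]] else []) ++ bRun (some c) cs := rfl
        have e5 : pend prev (c :: cs) = [] := by unfold pend; simp [h1']
        have e4 : pvKeep (some d) c cs.head? =
            (match cs with | e :: _ => PySem.Chars.isdigit e | [] => false) := by
          cases cs with
          | nil => simp [pvKeep, h1']
          | cons e t =>
            simp only [pvKeep, List.head?_cons]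
            rw [h1', hsep, hd]
            simp
        have e2 : pend (String.ofList [c]) cs =
            (if (match cs with | e :: _ => PySem.Chars.isdigit e | [] => false) = true
             then [String.ofList [c]] else []) := by
          unfold pend; simp only [hco, Bool.true_and]; cases cs <;> rfl
        rw [e1, hrec, e2, e3, e4, e5]
        cases cs <;> simp
      · -- any other character: A resets; B keeps nothing here
        have hrec := ih "" (some c) (Or.inr (Or.inr ⟨rfl, Or.inr ⟨c, rfl, by simpa using h1⟩⟩))
        have hk : pvKeep p c cs.head? = false := by
          unfold pvKeep
          rw [show PySem.Chars.isdigit c = false by simpa using h1, Bool.false_or]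
          by_cases hc : [',', '.'].contains c = true
          · have hdigf : PySem.Str.strIsdigit prev = false := by
              cases hh : PySem.Str.strIsdigit prev with
              | false => rfl
              | true =>
                exact absurd (show ([',', '.'].contains c && PySem.Str.strIsdigit prev) = true by
                  rw [hc, hh]; rfl) h2
            cases p with
            | none => simp
            | some pc =>
              have hpc : PySem.Chars.isdigit pc = false := by
                rcases h with ⟨d, hpv, hd, hprev⟩ | ⟨s, hpv, hs, hprev⟩ | ⟨hprev, hq⟩
                · rw [hprev, strIsdigit_single, hd] at hdigf; cases hdigf
                · injection hpv with hpv'; subst hpv'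
                  rcases hs with hs | hs <;> subst hs <;> decide
                · rcases hq with hq | ⟨c', hpv', hc'⟩
                  · simp at hq
                  · injection hpv' with hpv''; subst hpv''; exact hc'
              simp [hpc]
          · rw [show [',', '.'].contains c = false by simpa using hc]
            simp
        have e1 : aRun (c :: cs) prev = aRun cs "" := by
          simp only [aRun]; rw [if_neg h1, if_neg h2]
        have e3 : bRun p (c :: cs) =
            (if pvKeep p c cs.head? then [String.ofList [c]] else []) ++ bRun (some c) cs := rfl
        have e5 : pend prev (c :: cs) = [] := by
          unfold pend
          simp [show PySem.Chars.isdigit c = false by simpa using h1]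
        rw [e1, hrec, e3, hk, e5]
        simp [pend]

-- ===== VERDICT (by name: the statement is the Claim_ definition above) =====
theorem get_all_spec : Claim_equal_get_all := by
  intro s _
  unfold Spec_get_all get_all get_all_alt
  rw [foldl_fst, zip_filter_eq_bRun,
      aRun_eq s.toList "" none (Or.inr (Or.inr ⟨rfl, Or.inl rfl⟩))]
  simp [pend]
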